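-- pv_equiv track=rewrite | github.com/loanmir/MathOpt_Paper | data_inizialization.py | generate_feasible_scenarios
-- ===== SOURCE A (Python) =====
-- def generate_feasible_scenarios(route_id, stops, stop_distances, b_type, c_type, dmax_b):
--     """Generate ordered feasible charging stop sequences"""
--     from itertools import combinations
--
--     scenarios = []
--     num_stops = len(stops)
--
--     # For each possible number of charging stops
--     for k in range(1, num_stops + 1):
--         for indices in combinations(range(num_stops), k):
--             candidate_stops = [stops[i] for i in indices]
--
--             # Check feasibility based on maximum distance
--             dist_since_last_charge = 0
--             feasible = True
--
--             for i in range(num_stops):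
--                 dist_since_last_charge += stop_distances[i % len(stop_distances)]
--                 if stops[i % num_stops] in candidate_stops:
--                     dist_since_last_charge = 0
--                 if dist_since_last_charge > dmax_b:
--                     feasible = False
--                     break
--
--             if feasible:
--                 scenarios.append(candidate_stops)
--
--     return scenarios
-- ===== SOURCE B (Python) =====
-- def generate_feasible_scenarios(route_id, stops, stop_distances, b_type, c_type, dmax_b):
--     """Generate ordered feasible charging stop sequences.
--
--     Prefix sums replace A's running re-summation; each distinct stop value gets one
--     bit, the recursive combination generator carries the chosen-value bitmask, and
--     feasibility (which depends only on that value set) is memoized per mask.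
--     A negative dmax_b admits no scenario at all (any chosen stop resets the
--     distance to 0, which already exceeds a negative bound)."""
--     if dmax_b < 0:
--         return []
--     n = len(stops)
--     m = len(stop_distances)
--     pref = [0] * (n + 1)
--     for i in range(n):
--         pref[i + 1] = pref[i] + stop_distances[i % m]
--     bit = {}
--     for v in stops:
--         if v not in bit:
--             bit[v] = 1 << len(bit)
--     bits = [bit[v] for v in stops]
--     cache = {}
--
--     def feasible(mask):
--         res = True
--         last = 0
--         for i in range(n):
--             if bits[i] & mask:
--                 last = pref[i + 1]
--             elif pref[i + 1] - last > dmax_b: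
--                 res = False
--                 break
--         cache[mask] = res
--         return res
--
--     scenarios = []
--
--     def gen(start, k, chosen, mask):
--         if k == 1:
--             for j in range(start, n):
--                 mk = mask | bits[j]
--                 ok = cache.get(mk)
--                 if ok is None:
--                     ok = feasible(mk)
--                 if ok:
--                     scenarios.append(chosen + [stops[j]])
--             return
--         for j in range(start, n - k + 1):
--             chosen.append(stops[j])
--             gen(j + 1, k - 1, chosen, mask | bits[j])
--             chosen.pop()
--
--     for k in range(1, n + 1):
--         gen(0, k, [], 0)
--     return scenarios
-- ===== Notes on version B (the rewrite author's own statement) =====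
-- stated objective: faster
-- what changed: B precomputes prefix sums of the cyclic distances, assigns each distinct stop value a bit, enumerates combinations with its own recursive generator that carries the chosen-value bitmask incrementally, memoizes feasibility per mask (feasibility depends only on the value set), and returns [] immediately for a negative dmax_b (no scenario can satisfy it); A instead re-runs an O(n*k) running-sum membership scan for every subset.
import Mathlib
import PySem

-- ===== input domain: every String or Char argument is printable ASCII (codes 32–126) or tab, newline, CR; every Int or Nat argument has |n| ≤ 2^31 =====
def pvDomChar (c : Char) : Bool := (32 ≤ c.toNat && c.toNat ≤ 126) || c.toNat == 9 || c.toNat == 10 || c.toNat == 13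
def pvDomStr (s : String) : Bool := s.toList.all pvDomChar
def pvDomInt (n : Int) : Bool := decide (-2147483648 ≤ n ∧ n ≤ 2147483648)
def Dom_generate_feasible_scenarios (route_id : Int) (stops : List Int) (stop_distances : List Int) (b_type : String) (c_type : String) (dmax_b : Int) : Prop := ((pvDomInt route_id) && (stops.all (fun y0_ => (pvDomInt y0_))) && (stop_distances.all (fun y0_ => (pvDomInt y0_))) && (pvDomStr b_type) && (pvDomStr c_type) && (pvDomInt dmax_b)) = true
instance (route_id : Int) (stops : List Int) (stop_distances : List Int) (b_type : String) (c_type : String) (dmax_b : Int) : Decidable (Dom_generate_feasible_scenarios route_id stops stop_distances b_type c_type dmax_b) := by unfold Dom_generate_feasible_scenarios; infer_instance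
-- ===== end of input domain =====

-- B replaces A's per-candidate running-sum re-scan (O(n·k) per subset) by precomputed prefix
-- sums, a bitmask of chosen distinct stop values carried by a recursive combination
-- generator, and a feasibility memo per mask (feasibility depends only on the value set).

-- ===== PORT A =====
-- inner 'for i in range(num_stops)' loop of A, with early break; fuel = remaining iterations
def pvGoA (stops stop_distances : List Int) (dmax_b : Int) (cand : List Int) : Nat → Nat → Int → Bool
  | 0, _, _ => true
  | fuel+1, i, dist =>
    let dist := dist + PySem.List.pyGetD stop_distances (Int.ofNat (i % stop_distances.length)) 0
    let dist := if cand.contains (PySem.List.pyGetD stops (Int.ofNat (i % stops.length)) 0) then 0 else dist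
    if dist > dmax_b then false
    else pvGoA stops stop_distances dmax_b cand fuel (i+1) dist

def generate_feasible_scenarios (route_id : Int) (stops : List Int) (stop_distances : List Int) (b_type : String) (c_type : String) (dmax_b : Int) : List (List Int) :=
  let num_stops := stops.length
  (PySem.List.pyRange 1 ((num_stops : Int) + 1)).foldl (fun scenarios k =>
    (PySem.List.combinations (PySem.List.pyRange 0 (num_stops : Int)) k.toNat).foldl (fun scenarios indices =>
      let candidate_stops := indices.map (fun i => PySem.List.pyGetD stops i 0)
      if pvGoA stops stop_distances dmax_b candidate_stops num_stops 0 0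
      then scenarios ++ [candidate_stops] else scenarios) scenarios) []

-- ===== PORT B =====
-- Source B's pref-building loop: pref[i] = total distance consumed after the first i steps
def pvPref (stop_distances : List Int) (n : Nat) : List Int :=
  (List.range n).foldl (fun pref i =>
    pref ++ [pref.getD i 0 + PySem.List.pyGetD stop_distances (Int.ofNat (i % stop_distances.length)) 0]) [0]

-- Source B's bit dict: each distinct stop value gets the next power-of-two bit
def pvBit (stops : List Int) : PySem.Dict Int Int :=
  stops.foldl (fun bit v => if bit.contains v then bit else bit.insert v ((1 : Int) <<< bit.size)) PySem.Dict.empty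

-- Source B's feasibility scan over the mask (early break; fuel = remaining iterations)
def pvGoB (bits pref : List Int) (dmax_b : Int) (mask : Int) : Nat → Nat → Int → Bool
  | 0, _, _ => true
  | fuel+1, i, last =>
    if PySem.Int.band (bits.getD i 0) mask ≠ 0 then
      pvGoB bits pref dmax_b mask fuel (i+1) (pref.getD (i+1) 0)
    else if pref.getD (i+1) 0 - last > dmax_b then false
    else pvGoB bits pref dmax_b mask fuel (i+1) last

-- Source B's 'feasible(mask)': compute and store in the cache
def pvFeasible (bits pref : List Int) (dmax_b : Int) (n : Nat)
    (cache : PySem.Dict Int Bool) (mask : Int) : Bool × PySem.Dict Int Bool :=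
  let ok := pvGoB bits pref dmax_b mask n 0 0
  (ok, cache.insert mask ok)

-- Source B's recursive generator 'gen'; state = (scenarios, cache); chosen is passed extended
-- (Source B's append/pop backtracking), 'chosen.copy()' at the leaf is the list itself here
def pvGen (stops bits pref : List Int) (dmax_b : Int) (n : Nat) (start k : Nat)
    (chosen : List Int) (mask : Int) (st : List (List Int) × PySem.Dict Int Bool) :
    List (List Int) × PySem.Dict Int Bool :=
  match k with
  | 0 => st      -- unreachable: gen is only invoked with k ≥ 1
  | 1 =>
    (PySem.List.pyRange (start : Int) (n : Int)).foldl (fun st j =>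
      let mk := PySem.Int.bor mask (bits.getD j.toNat 0)
      match st.2.get? mk with
      | some ok => (if ok then st.1 ++ [chosen ++ [stops.getD j.toNat 0]] else st.1, st.2)
      | none =>
        let r := pvFeasible bits pref dmax_b n st.2 mk
        (if r.1 then st.1 ++ [chosen ++ [stops.getD j.toNat 0]] else st.1, r.2)) st
  | k'+2 =>
    (PySem.List.pyRange (start : Int) ((n : Int) - (k'+2) + 1)).foldl (fun st j =>
      pvGen stops bits pref dmax_b n (j.toNat + 1) (k'+1) (chosen ++ [stops.getD j.toNat 0])
        (PySem.Int.bor mask (bits.getD j.toNat 0)) st) st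
  termination_by k

def generate_feasible_scenarios_alt (route_id : Int) (stops : List Int) (stop_distances : List Int) (b_type : String) (c_type : String) (dmax_b : Int) : List (List Int) :=
  if dmax_b < 0 then []
  else
    let n := stops.length
    let pref := pvPref stop_distances n
    let bits := stops.map (fun v => (pvBit stops).getD v 0)
    ((PySem.List.pyRange 1 ((n : Int) + 1)).foldl
      (fun st k => pvGen stops bits pref dmax_b n 0 k.toNat [] 0 st)
      ([], PySem.Dict.empty)).1

-- ===== PRECONDITION & SPEC =====
-- Pre_ excludes only inputs where Python A raises: with a nonempty stop list and an empty
-- distance list, 'i % len(stop_distances)' raises ZeroDivisionError.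
def Pre_generate_feasible_scenarios (route_id : Int) (stops : List Int) (stop_distances : List Int) (b_type : String) (c_type : String) (dmax_b : Int) : Prop :=
  stops = [] ∨ stop_distances ≠ []
instance (route_id : Int) (stops : List Int) (stop_distances : List Int) (b_type : String) (c_type : String) (dmax_b : Int) : Decidable (Pre_generate_feasible_scenarios route_id stops stop_distances b_type c_type dmax_b) := by unfold Pre_generate_feasible_scenarios; infer_instance

def pvWitness_generate_feasible_scenarios : Int × List Int × List Int × String × String × Int :=
  (1, [10, 20, 30], [4, 3, 5], "BYD", "CCS", 8)

def Spec_generate_feasible_scenarios (route_id : Int) (stops : List Int) (stop_distances : List Int) (b_type : String) (c_type : String) (dmax_b : Int) (out : List (List Int)) : Prop := out = generate_feasible_scenarios_alt route_id stops stop_distances b_type c_type dmax_b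
instance (route_id : Int) (stops : List Int) (stop_distances : List Int) (b_type : String) (c_type : String) (dmax_b : Int) (out : List (List Int)) : Decidable (Spec_generate_feasible_scenarios route_id stops stop_distances b_type c_type dmax_b out) := by unfold Spec_generate_feasible_scenarios; infer_instance

-- ===== CLAIM (what is proved, stated in full; the proofs are below) =====
def Claim_equal_generate_feasible_scenarios : Prop := ∀ (route_id : Int) (stops : List Int) (stop_distances : List Int) (b_type : String) (c_type : String) (dmax_b : Int), Dom_generate_feasible_scenarios route_id stops stop_distances b_type c_type dmax_b → Pre_generate_feasible_scenarios route_id stops stop_distances b_type c_type dmax_b → Spec_generate_feasible_scenarios route_id stops stop_distances b_type c_type dmax_b (generate_feasible_scenarios route_id stops stop_distances b_type c_type dmax_b)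

-- ===== LEMMAS AND PROOFS =====

-- mathematical prefix sum (proof-side only)
def pvP (d : List Int) : Nat → Int
  | 0 => 0
  | j+1 => pvP d j + PySem.List.pyGetD d (Int.ofNat (j % d.length)) 0

def pvBits (stops : List Int) : List Int := stops.map (fun v => (pvBit stops).getD v 0)

def pvMaskOf (stops : List Int) (c : List Int) : Int :=
  c.foldl (fun M v => PySem.Int.bor M ((pvBit stops).getD v 0)) 0

def pvNatMask (stops : List Int) (c : List Int) : Nat :=
  c.foldl (fun M v => M ||| 2 ^ (List.idxOf v (PySem.Set.ofList stops))) 0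

def pvCacheOK (bits pref : List Int) (dmax : Int) (n : Nat) (cache : PySem.Dict Int Bool) : Prop :=
  ∀ M b, cache.get? M = some b → b = pvGoB bits pref dmax M n 0 0

-- the loop body of pvGen's k = 1 case, folded over whole candidate lists (proof-side)
def pvLeafFold (stops bits pref : List Int) (dmax : Int) (n : Nat)
    (cs : List (List Int)) (st : List (List Int) × PySem.Dict Int Bool) :
    List (List Int) × PySem.Dict Int Bool :=
  cs.foldl (fun st cand =>
    match st.2.get? (pvMaskOf stops cand) with
    | some ok => (if ok then st.1 ++ [cand] else st.1, st.2)
    | none =>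
      let r := pvFeasible bits pref dmax n st.2 (pvMaskOf stops cand)
      (if r.1 then st.1 ++ [cand] else st.1, r.2)) st

theorem pvPref_eq (d : List Int) (n : Nat) :
    pvPref d n = (List.range (n+1)).map (pvP d) := by
  induction n with
  | zero => rfl
  | succ n ih =>
    unfold pvPref at ih ⊢
    rw [List.range_succ, List.foldl_append, ih, List.foldl_cons, List.foldl_nil,
        PySem.List.getD_map_range _ _ _ _ (Nat.lt_succ_self n)]
    rw [List.range_succ (n := n+1), List.map_append]
    rfl

theorem pvPref_getD (d : List Int) (n j : Nat) (h : j ≤ n) :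
    (pvPref d n).getD j 0 = pvP d j := by
  rw [pvPref_eq, PySem.List.getD_map_range _ _ _ _ (Nat.lt_succ_of_le h)]

-- characterization of Source B's bit dict: value v ↦ 2 ^ (first-occurrence rank of v)
theorem pvBit_spec (stops : List Int) :
    (pvBit stops).size = (PySem.Set.ofList stops).length ∧
    ∀ v, (pvBit stops).get? v =
      if v ∈ PySem.Set.ofList stops
      then some ((2:Int) ^ (List.idxOf v (PySem.Set.ofList stops))) else none := by
  induction stops using List.reverseRecOn with
  | nil =>
    refine ⟨rfl, fun v => ?_⟩
    rw [if_neg (by simp [PySem.Set.ofList_nil])]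
    rfl
  | append_singleton l x ih =>
    obtain ⟨ihs, ihg⟩ := ih
    have hstep : pvBit (l ++ [x])
        = if (pvBit l).contains x then pvBit l
          else (pvBit l).insert x ((1 : Int) <<< (pvBit l).size) := by
      unfold pvBit
      rw [List.foldl_append, List.foldl_cons, List.foldl_nil]
    have hcont : (pvBit l).contains x = decide (x ∈ PySem.Set.ofList l) := by
      rw [PySem.Dict.contains_eq_isSome_get?, ihg x]
      by_cases hx : x ∈ PySem.Set.ofList l
      · rw [if_pos hx]; simp [hx]
      · rw [if_neg hx]; simp [hx]
    by_cases hx : x ∈ PySem.Set.ofList l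
    · have hset : PySem.Set.ofList (l ++ [x]) = PySem.Set.ofList l := by
        rw [PySem.Set.ofList_append_singleton, PySem.Set.add_of_mem hx]
      rw [hstep, hcont, if_pos (by simp [hx]), hset]
      exact ⟨ihs, ihg⟩
    · have hset : PySem.Set.ofList (l ++ [x]) = PySem.Set.ofList l ++ [x] := by
        rw [PySem.Set.ofList_append_singleton, PySem.Set.add_of_not_mem hx]
      rw [hstep, hcont, if_neg (by simp [hx]), hset]
      constructor
      · rw [PySem.Dict.size_insert, hcont, if_neg (by simp [hx]), ihs,
            List.length_append, List.length_singleton]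
      · intro v
        rw [PySem.Dict.get?_insert]
        by_cases hv : v = x
        · subst hv
          rw [if_pos rfl, if_pos (by simp),
              List.idxOf_append (l₂ := [v]), if_neg hx]
          have : List.idxOf v [v] = 0 := by simp
          rw [this, Int.shiftLeft_eq, one_mul, ihs]
          norm_num
        · rw [if_neg hv, ihg v, List.idxOf_append (l₂ := [x])]
          by_cases hvl : v ∈ PySem.Set.ofList l
          · rw [if_pos hvl, if_pos (by simp [hvl]), if_pos hvl]
          · rw [if_neg hvl, if_neg (by simp [hvl, hv])]

theorem pvBit_getD (stops : List Int) (v : Int) (hv : v ∈ stops) :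
    (pvBit stops).getD v 0 = (2:Int) ^ (List.idxOf v (PySem.Set.ofList stops)) := by
  rw [PySem.Dict.getD_eq_get?_getD, (pvBit_spec stops).2 v,
      if_pos ((PySem.Set.mem_ofList stops v).mpr hv)]
  rfl

theorem pvMaskOf_natCast (stops c : List Int) (hc : ∀ v ∈ c, v ∈ stops) :
    pvMaskOf stops c = ((pvNatMask stops c : Nat) : Int) := by
  have aux : ∀ (c : List Int), (∀ v ∈ c, v ∈ stops) → ∀ M0 : Nat,
      (c.foldl (fun M v => PySem.Int.bor M ((pvBit stops).getD v 0)) ((M0 : Nat) : Int))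
        = ((c.foldl (fun M v => M ||| 2 ^ (List.idxOf v (PySem.Set.ofList stops))) M0 : Nat) : Int) := by
    intro c
    induction c with
    | nil => intro _ M0; rfl
    | cons v c ih =>
      intro hc M0
      rw [List.foldl_cons, List.foldl_cons, pvBit_getD stops v (hc v (by simp))]
      have hpow : (2:Int) ^ (List.idxOf v (PySem.Set.ofList stops))
          = (((2 ^ (List.idxOf v (PySem.Set.ofList stops)) : Nat) : Nat) : Int) := by
        push_cast; ring
      rw [hpow, PySem.Int.bor_natCast]
      exact ih (fun w hw => hc w (by simp [hw])) _
  exact aux c hc 0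

theorem pvNatMask_testBit (stops c : List Int) (t : Nat) :
    (pvNatMask stops c).testBit t = true ↔
      ∃ v ∈ c, List.idxOf v (PySem.Set.ofList stops) = t := by
  have aux : ∀ (c : List Int) (M0 : Nat),
      (c.foldl (fun M v => M ||| 2 ^ (List.idxOf v (PySem.Set.ofList stops))) M0).testBit t = true
        ↔ (∃ v ∈ c, List.idxOf v (PySem.Set.ofList stops) = t) ∨ M0.testBit t = true := by
    intro c
    induction c with
    | nil => intro M0; simp
    | cons v c ih =>
      intro M0
      rw [List.foldl_cons, ih]
      constructor
      · rintro (⟨w, hw, hwt⟩ | hbit)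
        · exact Or.inl ⟨w, by simp [hw], hwt⟩
        · rw [Nat.testBit_or, Bool.or_eq_true, Nat.testBit_two_pow] at hbit
          rcases hbit with h | h
          · exact Or.inr h
          · exact Or.inl ⟨v, by simp, by simpa using h⟩
      · rintro (⟨w, hw, hwt⟩ | hbit)
        · rcases List.mem_cons.mp hw with h | h
          · subst h
            refine Or.inr ?_
            rw [Nat.testBit_or, Bool.or_eq_true, Nat.testBit_two_pow]
            exact Or.inr (by simpa using hwt)
          · exact Or.inl ⟨w, h, hwt⟩
        · refine Or.inr ?_
          rw [Nat.testBit_or, Bool.or_eq_true]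
          exact Or.inl hbit
  unfold pvNatMask
  rw [aux c 0]
  simp

theorem pvBits_getD (stops : List Int) (i : Nat) (hi : i < stops.length) :
    (pvBits stops).getD i 0 = (pvBit stops).getD (stops.getD i 0) 0 := by
  unfold pvBits
  rw [List.getD_eq_getElem?_getD, List.getElem?_map, List.getD_eq_getElem?_getD,
      List.getElem?_eq_getElem hi]
  rfl

-- the bit test 'bits[i] & mask' is exactly A's membership test 'stops[i] in cand'
theorem pvHit (stops c : List Int) (hc : ∀ v ∈ c, v ∈ stops) (i : Nat) (hi : i < stops.length) :
    (PySem.Int.band ((pvBits stops).getD i 0) (pvMaskOf stops c) ≠ 0) ↔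
      c.contains (stops.getD i 0) = true := by
  have hu : stops.getD i 0 ∈ stops := by
    rw [List.getD_eq_getElem?_getD, List.getElem?_eq_getElem hi]
    exact List.getElem_mem hi
  rw [pvBits_getD stops i hi, pvBit_getD stops _ hu, pvMaskOf_natCast stops c hc]
  have hpow : (2:Int) ^ (List.idxOf (stops.getD i 0) (PySem.Set.ofList stops))
      = (((2:Nat) ^ (List.idxOf (stops.getD i 0) (PySem.Set.ofList stops)) : Nat) : Int) := by
    push_cast; ring
  rw [hpow, PySem.Int.band_natCast]
  rw [Ne, Int.natCast_eq_zero, Nat.and_comm, Nat.and_two_pow]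
  constructor
  · intro h
    have htb : (pvNatMask stops c).testBit (List.idxOf (stops.getD i 0) (PySem.Set.ofList stops)) = true := by
      cases hb : (pvNatMask stops c).testBit (List.idxOf (stops.getD i 0) (PySem.Set.ofList stops)) with
      | false => rw [hb] at h; simp at h
      | true => rfl
    obtain ⟨v, hv, hvt⟩ := (pvNatMask_testBit stops c _).mp htb
    have : v = stops.getD i 0 :=
      (List.idxOf_inj ((PySem.Set.mem_ofList stops v).mpr (hc v hv))).mp hvt
    rw [List.contains_iff_mem]
    exact this ▸ hv
  · intro h
    have hmem : stops.getD i 0 ∈ c := List.contains_iff_mem.mp h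
    have htb := (pvNatMask_testBit stops c _).mpr ⟨stops.getD i 0, hmem, rfl⟩
    rw [htb]
    simp

theorem pvMaskOf_append (stops c : List Int) (v : Int) :
    pvMaskOf stops (c ++ [v]) = PySem.Int.bor (pvMaskOf stops c) ((pvBit stops).getD v 0) := by
  unfold pvMaskOf
  rw [List.foldl_append]
  rfl

-- lockstep equivalence of A's scan and B's prefix-sum/mask scan (dmax_b ≥ 0)
theorem pvGo_eq (stops d : List Int) (dmax : Int) (hd : 0 ≤ dmax) (c : List Int)
    (hc : ∀ v ∈ c, v ∈ stops) :
    ∀ fuel i dist last, i + fuel = stops.length → dist = pvP d i - last →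
      pvGoA stops d dmax c fuel i dist
        = pvGoB (pvBits stops) (pvPref d stops.length) dmax (pvMaskOf stops c) fuel i last := by
  intro fuel
  induction fuel with
  | zero => intro i dist last _ _; rfl
  | succ fuel ih =>
    intro i dist last hn hdist
    have hi : i < stops.length := by omega
    have hstop : PySem.List.pyGetD stops (Int.ofNat (i % stops.length)) 0 = stops.getD i 0 := by
      rw [Nat.mod_eq_of_lt hi]; exact PySem.List.pyGetD_natCast stops i 0
    have hpref1 : (pvPref d stops.length).getD (i+1) 0 = pvP d (i+1) :=
      pvPref_getD d _ _ (by omega)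
    simp only [pvGoA, pvGoB, hstop, hpref1]
    have h0 : dist + PySem.List.pyGetD d (Int.ofNat (i % d.length)) 0 = pvP d (i+1) - last := by
      rw [hdist]; simp [pvP]; ring
    by_cases hcin : c.contains (stops.getD i 0) = true
    · rw [if_pos hcin, if_pos ((pvHit stops c hc i hi).mpr hcin)]
      rw [if_neg (by omega : ¬ ((0:Int) > dmax))]
      exact ih (i+1) 0 (pvP d (i+1)) (by omega) (by ring)
    · rw [if_neg hcin, if_neg (fun h => hcin ((pvHit stops c hc i hi).mp h)), h0]
      by_cases hbig : pvP d (i+1) - last > dmax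
      · rw [if_pos hbig, if_pos hbig]
      · rw [if_neg hbig, if_neg hbig]
        exact ih (i+1) (pvP d (i+1) - last) last (by omega) rfl

-- pvLeafFold: cache stays correct and the scenario list grows by the feasible candidates
theorem pvLeafFold_spec (stops bits pref : List Int) (dmax : Int) (n : Nat) :
    ∀ (cs : List (List Int)) st, pvCacheOK bits pref dmax n st.2 →
      (pvLeafFold stops bits pref dmax n cs st).1
        = cs.foldl (fun sc cand =>
            if pvGoB bits pref dmax (pvMaskOf stops cand) n 0 0 then sc ++ [cand] else sc) st.1
      ∧ pvCacheOK bits pref dmax n (pvLeafFold stops bits pref dmax n cs st).2 := by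
  intro cs
  induction cs with
  | nil => intro st hc; exact ⟨rfl, hc⟩
  | cons cand cs ih =>
    intro st hc
    unfold pvLeafFold
    rw [List.foldl_cons]
    cases hget : st.2.get? (pvMaskOf stops cand) with
    | some ok =>
      have hok : ok = pvGoB bits pref dmax (pvMaskOf stops cand) n 0 0 := hc _ _ hget
      have h2 := ih ((if ok then st.1 ++ [cand] else st.1), st.2) hc
      unfold pvLeafFold at h2
      rw [List.foldl_cons, ← hok]
      exact h2
    | none =>
      have hcache : pvCacheOK bits pref dmax n
          ((pvFeasible bits pref dmax n st.2 (pvMaskOf stops cand)).2) := by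
        intro M b hMb
        unfold pvFeasible at hMb
        simp only at hMb
        rw [PySem.Dict.get?_insert] at hMb
        split at hMb
        · rename_i heq; cases hMb; rw [heq]
        · exact hc _ _ hMb
      have h2 := ih (((if (pvFeasible bits pref dmax n st.2 (pvMaskOf stops cand)).1
          then st.1 ++ [cand] else st.1),
          (pvFeasible bits pref dmax n st.2 (pvMaskOf stops cand)).2)) hcache
      unfold pvLeafFold at h2
      rw [List.foldl_cons]
      exact h2

theorem pvLeafFold_append (stops bits pref : List Int) (dmax : Int) (n : Nat)
    (cs₁ cs₂ : List (List Int)) (st : List (List Int) × PySem.Dict Int Bool) :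
    pvLeafFold stops bits pref dmax n (cs₁ ++ cs₂) st
      = pvLeafFold stops bits pref dmax n cs₂ (pvLeafFold stops bits pref dmax n cs₁ st) := by
  unfold pvLeafFold
  rw [List.foldl_append]

theorem pvRange_nil (a b : Int) (h : b ≤ a) : PySem.List.pyRange a b = [] := by
  simp [PySem.List.pyRange]
  omega

-- the recursive generator enumerates exactly the (k, lexicographic) combinations
theorem pvGen_eq (stops d : List Int) (dmax : Int) :
    ∀ K t start (chosen : List Int) st, stops.length - start ≤ t →
      pvGen stops (pvBits stops) (pvPref d stops.length) dmax stops.length start (K+1) chosen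
          (pvMaskOf stops chosen) st
        = pvLeafFold stops (pvBits stops) (pvPref d stops.length) dmax stops.length
            ((PySem.List.combinations (stops.drop start) (K+1)).map (fun c => chosen ++ c)) st := by
  intro K
  induction K with
  | zero =>
    intro t
    induction t with
    | zero =>
      intro start chosen st hst
      have hs : stops.length ≤ start := by omega
      simp only [Nat.zero_add, pvGen]
      rw [pvRange_nil _ _ (by exact_mod_cast hs), List.foldl_nil,
          List.drop_eq_nil_of_le hs, PySem.List.combinations_nil_succ]
      rfl
    | succ t ih =>
      intro start chosen st hst
      by_cases hs : start < stops.length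
      · have hx : stops.getD start 0 = stops[start] := by
          rw [List.getD_eq_getElem?_getD, List.getElem?_eq_getElem hs]; rfl
        simp only [Nat.zero_add, pvGen]
        rw [PySem.List.pyRange_one_cons (by exact_mod_cast hs)]
        simp only [List.foldl_cons, Int.toNat_natCast]
        rw [pvBits_getD stops start hs, hx, ← pvMaskOf_append]
        rw [List.drop_eq_getElem_cons hs, PySem.List.combinations_cons_succ,
            PySem.List.combinations_zero, List.map_append]
        simp only [List.map_cons, List.map_nil, List.singleton_append]
        unfold pvLeafFold
        rw [List.foldl_cons]
        have ih' := ih (start+1) chosen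
          ((fun (st : List (List Int) × PySem.Dict Int Bool) (cand : List Int) =>
            match st.2.get? (pvMaskOf stops cand) with
            | some ok => (if ok then st.1 ++ [cand] else st.1, st.2)
            | none =>
              let r := pvFeasible (pvBits stops) (pvPref d stops.length) dmax stops.length st.2
                (pvMaskOf stops cand)
              (if r.1 then st.1 ++ [cand] else st.1, r.2)) st (chosen ++ [stops[start]]))
          (by omega)
        simp only [Nat.zero_add, pvGen] at ih'
        unfold pvLeafFold at ih'
        rw [show ((start:Int)) + 1 = ((start+1 : Nat) : Int) from by push_cast; ring]
        exact ih'
      · have hs' : stops.length ≤ start := by omega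
        simp only [Nat.zero_add, pvGen]
        rw [pvRange_nil _ _ (by exact_mod_cast hs'), List.foldl_nil,
            List.drop_eq_nil_of_le hs', PySem.List.combinations_nil_succ]
        rfl
  | succ K ihK =>
    intro t
    induction t with
    | zero =>
      intro start chosen st hst
      have hs : stops.length ≤ start := by omega
      rw [show K+1+1 = K+2 from rfl]
      simp only [pvGen]
      rw [pvRange_nil _ _ (by push_cast; omega), List.foldl_nil,
          List.drop_eq_nil_of_le hs, PySem.List.combinations_nil_succ]
      rfl
    | succ t ih =>
      intro start chosen st hst
      by_cases hs : (start : Int) < (stops.length : Int) - (K+2) + 1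
      · have hsn : start < stops.length := by omega
        have hx : stops.getD start 0 = stops[start] := by
          rw [List.getD_eq_getElem?_getD, List.getElem?_eq_getElem hsn]; rfl
        rw [show K+1+1 = K+2 from rfl]
        simp only [pvGen]
        rw [PySem.List.pyRange_one_cons hs]
        simp only [List.foldl_cons, Int.toNat_natCast]
        rw [pvBits_getD stops start hsn, hx, ← pvMaskOf_append]
        -- first block via the outer IH on K
        have hfirst := ihK (t) (start+1) (chosen ++ [stops[start]]) st (by omega)
        rw [hfirst]
        -- remaining loop is pvGen at start+1 with the same k
        have ih' := ih (start+1)  chosen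
          (pvLeafFold stops (pvBits stops) (pvPref d stops.length) dmax stops.length
            ((PySem.List.combinations (stops.drop (start+1)) (K+1)).map
              (fun c => (chosen ++ [stops[start]]) ++ c)) st)
          (by omega)
        rw [show K+1+1 = K+2 from rfl] at ih'
        simp only [pvGen] at ih'
        rw [show ((start:Int)) + 1 = ((start+1 : Nat) : Int) from by push_cast; ring]
        rw [ih']
        rw [← pvLeafFold_append]
        congr 1
        rw [List.drop_eq_getElem_cons hsn, PySem.List.combinations_cons_succ,
            List.map_append, List.map_map]
        congr 1
        apply List.map_congr_left
        intro c _
        simp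
      · have hnil : PySem.List.pyRange (start : Int) ((stops.length : Int) - (K+2) + 1) = [] :=
          pvRange_nil _ _ (by omega)
        have hlen : (stops.drop start).length < K + 2 := by
          rw [List.length_drop]
          omega
        rw [show K+1+1 = K+2 from rfl]
        simp only [pvGen]
        rw [hnil, List.foldl_nil, PySem.List.combinations_eq_nil_of_length_lt _ hlen]
        rfl

-- a candidate list drawn from the stops is value-wise contained in the stops
theorem pvCombs_subset (stops : List Int) (r : Nat) (c : List Int)
    (hmem : c ∈ PySem.List.combinations stops r) : ∀ v ∈ c, v ∈ stops :=
  fun v hv => (PySem.List.sublist_of_mem_combinations hmem).mem hv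

-- A's inner loop over index combinations is the same loop over value combinations
theorem pvCombs_eq (stops : List Int) (k : Nat) (sc : List (List Int)) (dmax : Int) (d : List Int) :
    (PySem.List.combinations (PySem.List.pyRange 0 (stops.length : Int)) k).foldl
        (fun sc indices =>
          let cand := indices.map (fun i => PySem.List.pyGetD stops i 0)
          if pvGoA stops d dmax cand stops.length 0 0 then sc ++ [cand] else sc) sc
      = (PySem.List.combinations stops k).foldl
          (fun sc cand => if pvGoA stops d dmax cand stops.length 0 0 then sc ++ [cand] else sc) sc := by
  have hmap : (PySem.List.pyRange 0 (stops.length : Int)).map (fun i => PySem.List.pyGetD stops i 0) = stops := by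
    have := PySem.List.map_pyGetD_pyRange_zero stops 0
    simpa [PySem.List.len] using this
  have hcomb : PySem.List.combinations stops k
      = (PySem.List.combinations (PySem.List.pyRange 0 (stops.length : Int)) k).map
          (List.map (fun i => PySem.List.pyGetD stops i 0)) := by
    rw [← PySem.List.combinations_map, hmap]
  rw [hcomb, List.foldl_map]

-- with a negative bound, A's scan rejects every candidate that contains a stop value
theorem pvGoA_false (stops d : List Int) (dmax : Int) (hneg : dmax < 0) (c : List Int) :
    ∀ fuel i dist,
      (∃ j, i ≤ j ∧ j < i + fuel ∧
        c.contains (PySem.List.pyGetD stops (Int.ofNat (j % stops.length)) 0) = true) →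
      pvGoA stops d dmax c fuel i dist = false := by
  intro fuel
  induction fuel with
  | zero => intro i dist ⟨j, h1, h2, _⟩; omega
  | succ fuel ih =>
    intro i dist ⟨j, h1, h2, hj⟩
    by_cases hi : c.contains (PySem.List.pyGetD stops (Int.ofNat (i % stops.length)) 0) = true
    · simp only [pvGoA, hi, if_true]
      rw [if_pos (by omega : (0:Int) > dmax)]
    · simp only [pvGoA]
      rw [if_neg hi]
      by_cases hbig : dist + PySem.List.pyGetD d (Int.ofNat (i % d.length)) 0 > dmax
      · rw [if_pos hbig]
      · rw [if_neg hbig]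
        refine ih (i+1) _ ⟨j, ?_, by omega, hj⟩
        rcases Nat.eq_or_lt_of_le h1 with h | h
        · exact absurd (h ▸ hj) hi
        · omega

-- with a negative bound A returns no scenario at all
theorem pvA_nil (route_id : Int) (stops stop_distances : List Int) (b_type c_type : String)
    (dmax_b : Int) (hneg : dmax_b < 0) :
    generate_feasible_scenarios route_id stops stop_distances b_type c_type dmax_b = [] := by
  unfold generate_feasible_scenarios
  have inner : ∀ k : Int, 1 ≤ k → ∀ sc : List (List Int),
      (PySem.List.combinations (PySem.List.pyRange 0 (stops.length : Int)) k.toNat).foldl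
        (fun sc indices =>
          let cand := indices.map (fun i => PySem.List.pyGetD stops i 0)
          if pvGoA stops stop_distances dmax_b cand stops.length 0 0 then sc ++ [cand] else sc)
        sc = sc := by
    intro k hk sc
    refine Eq.trans (PySem.List.foldl_congr_mem _ _ (fun sc _ => sc) _ ?_)
      (PySem.List.foldl_ignore _ _)
    intro acc indices hmem
    have hlen : indices.length = k.toNat := PySem.List.length_of_mem_combinations hmem
    cases indices with
    | nil => simp at hlen; omega
    | cons i0 rest =>
      have hi0 : i0 ∈ PySem.List.pyRange 0 (stops.length : Int) :=
        (PySem.List.sublist_of_mem_combinations hmem).mem (List.mem_cons_self)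
      have hb := PySem.List.mem_pyRange_one.mp hi0
      have hfalse : pvGoA stops stop_distances dmax_b
          ((i0 :: rest).map (fun i => PySem.List.pyGetD stops i 0)) stops.length 0 0 = false := by
        refine pvGoA_false stops stop_distances dmax_b hneg _ stops.length 0 0
          ⟨i0.toNat, by omega, by omega, ?_⟩
        have hjl : i0.toNat < stops.length := by omega
        rw [Nat.mod_eq_of_lt hjl]
        have : Int.ofNat i0.toNat = i0 := Int.toNat_of_nonneg hb.1
        rw [this, List.contains_iff_mem]
        exact List.mem_map_of_mem List.mem_cons_self
      simp only [hfalse, Bool.false_eq_true, if_false]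
  refine Eq.trans (PySem.List.foldl_congr_mem _ _ (fun sc _ => sc) _ ?_)
    (PySem.List.foldl_ignore _ _)
  intro acc k hk
  exact inner k (PySem.List.mem_pyRange_one.mp hk).1 acc

-- the outer loop over k, carrying the cache
theorem pvOuter (stops d : List Int) (dmax : Int) (hd : 0 ≤ dmax) :
    ∀ ks : List Int, (∀ k ∈ ks, 1 ≤ k) →
      ∀ sc cache, pvCacheOK (pvBits stops) (pvPref d stops.length) dmax stops.length cache →
      (ks.foldl (fun st k =>
          pvGen stops (pvBits stops) (pvPref d stops.length) dmax stops.length 0 k.toNat [] 0 st)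
          (sc, cache)).1
        = ks.foldl (fun sc k =>
            (PySem.List.combinations stops k.toNat).foldl
              (fun sc cand => if pvGoA stops d dmax cand stops.length 0 0 then sc ++ [cand] else sc) sc) sc
      ∧ pvCacheOK (pvBits stops) (pvPref d stops.length) dmax stops.length
          (ks.foldl (fun st k =>
            pvGen stops (pvBits stops) (pvPref d stops.length) dmax stops.length 0 k.toNat [] 0 st)
            (sc, cache)).2 := by
  intro ks
  induction ks with
  | nil => intro _ sc cache hc; exact ⟨rfl, hc⟩
  | cons k ks ih =>
    intro hks sc cache hc
    obtain ⟨K, hK⟩ : ∃ K, k.toNat = K + 1 := ⟨k.toNat - 1, by have := hks k (by simp); omega⟩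
    have hgen : pvGen stops (pvBits stops) (pvPref d stops.length) dmax stops.length 0 (K+1) [] 0 (sc, cache)
        = pvLeafFold stops (pvBits stops) (pvPref d stops.length) dmax stops.length
            ((PySem.List.combinations (stops.drop 0) (K+1)).map (fun c => [] ++ c)) (sc, cache) :=
      pvGen_eq stops d dmax K stops.length 0 [] (sc, cache) (by omega)
    have hmapid : (PySem.List.combinations (stops.drop 0) (K+1)).map (fun c => [] ++ c)
        = PySem.List.combinations stops (K+1) := by
      rw [List.drop_zero]
      simp
    rw [hmapid] at hgen
    obtain ⟨hl1, hl2⟩ := pvLeafFold_spec stops (pvBits stops) (pvPref d stops.length) dmax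
      stops.length (PySem.List.combinations stops (K+1)) (sc, cache) hc
    have hconv : (PySem.List.combinations stops (K+1)).foldl
        (fun sc cand => if pvGoB (pvBits stops) (pvPref d stops.length) dmax
            (pvMaskOf stops cand) stops.length 0 0 then sc ++ [cand] else sc) sc
        = (PySem.List.combinations stops (K+1)).foldl
            (fun sc cand => if pvGoA stops d dmax cand stops.length 0 0 then sc ++ [cand] else sc) sc := by
      refine PySem.List.foldl_congr_mem _ _ _ _ ?_
      intro acc cand hmem
      rw [pvGo_eq stops d dmax hd cand (pvCombs_subset stops (K+1) cand hmem)
        stops.length 0 0 0 (by omega) (by simp [pvP])]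
    simp only [List.foldl_cons, hK]
    rw [hgen]
    obtain ⟨g1, g2⟩ := ih (fun k' hk' => hks k' (by simp [hk']))
      (pvLeafFold stops (pvBits stops) (pvPref d stops.length) dmax stops.length
        (PySem.List.combinations stops (K+1)) (sc, cache)).1
      (pvLeafFold stops (pvBits stops) (pvPref d stops.length) dmax stops.length
        (PySem.List.combinations stops (K+1)) (sc, cache)).2 hl2
    rw [show pvLeafFold stops (pvBits stops) (pvPref d stops.length) dmax stops.length
          (PySem.List.combinations stops (K+1)) (sc, cache)
        = ((pvLeafFold stops (pvBits stops) (pvPref d stops.length) dmax stops.length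
            (PySem.List.combinations stops (K+1)) (sc, cache)).1,
           (pvLeafFold stops (pvBits stops) (pvPref d stops.length) dmax stops.length
            (PySem.List.combinations stops (K+1)) (sc, cache)).2) from rfl]
    refine ⟨?_, g2⟩
    rw [g1, hl1, hconv]

-- ===== VERDICT (by name: the statement is the Claim_ definition above) =====
theorem generate_feasible_scenarios_spec : Claim_equal_generate_feasible_scenarios := by
  intro route_id stops stop_distances b_type c_type dmax_b _ _
  unfold Spec_generate_feasible_scenarios
  by_cases hneg : dmax_b < 0
  · rw [pvA_nil route_id stops stop_distances b_type c_type dmax_b hneg]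
    unfold generate_feasible_scenarios_alt
    rw [if_pos hneg]
  · unfold generate_feasible_scenarios generate_feasible_scenarios_alt
    rw [if_neg hneg]
    refine Eq.trans (PySem.List.foldl_congr_mem _ _ _ _ ?_)
      ((pvOuter stops stop_distances dmax_b (by omega)
        (PySem.List.pyRange 1 ((stops.length : Int) + 1))
        (fun k hk => (PySem.List.mem_pyRange_one.mp hk).1)
        [] PySem.Dict.empty ?_).1).symm
    · intro acc k _
      exact pvCombs_eq stops k.toNat acc dmax_b stop_distances
    · intro M b hMb
      rw [PySem.Dict.get?_empty] at hMb
      cases hMb
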